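-- pv_equiv track=rewrite | github.com/linda603/leetcode | 126 Word Ladder II/126word-ladder-ii.py | get_ladders
-- ===== SOURCE A (Python) =====
-- def get_ladders(beginWord, endWord, visited):
--
--     def dfs(word):
--         if word == beginWord:
--             return [[beginWord]]
--         if word not in visited:
--             return []
--         res = []
--         parents = visited[word]
--         for parent in parents:
--             res += dfs(parent)
--         for r in res:
--             r.append(word)
--         return res
--
--     return dfs(endWord)
-- ===== SOURCE B (Python) =====
-- def get_ladders(beginWord, endWord, visited):
--     table = {}
--
--     def lookup(w):
--         if w == beginWord:
--             return [[beginWord]]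
--         return table.get(w, [])
--
--     for word, parents in visited.items():
--         table[word] = [r + [word] for p in parents for r in lookup(p)]
--     return lookup(endWord)
-- ===== Notes on version B (the rewrite author's own statement) =====
-- stated objective: alternative
-- what changed: Replaces A's top-down recursion from endWord with a single bottom-up tabulating pass over the parent map in its insertion (BFS-discovery) order; each word's ladders are computed once into a table instead of being re-derived recursively (it trades that for visiting every key, reachable or not).
-- outside the precondition, e.g. on get_ladders('a', 'c', {'c': ['b'], 'b': ['a']}): A returns [['a', 'b', 'c']], B returns []
import Mathlib
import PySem

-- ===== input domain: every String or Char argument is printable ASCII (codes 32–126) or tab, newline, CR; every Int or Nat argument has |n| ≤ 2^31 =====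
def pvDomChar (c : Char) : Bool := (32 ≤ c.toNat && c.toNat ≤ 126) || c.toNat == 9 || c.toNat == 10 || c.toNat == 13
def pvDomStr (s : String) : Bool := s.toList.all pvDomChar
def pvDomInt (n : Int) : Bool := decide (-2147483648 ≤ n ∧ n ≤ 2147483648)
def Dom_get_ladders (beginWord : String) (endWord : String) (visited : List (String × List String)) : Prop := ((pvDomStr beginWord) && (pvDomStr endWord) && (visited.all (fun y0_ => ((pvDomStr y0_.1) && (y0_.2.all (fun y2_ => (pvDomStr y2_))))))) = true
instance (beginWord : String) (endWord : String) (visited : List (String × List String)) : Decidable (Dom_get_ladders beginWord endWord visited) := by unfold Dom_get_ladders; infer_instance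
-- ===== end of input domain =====

-- B replaces A's top-down recursion from endWord by one bottom-up tabulating pass over the
-- parent map in its insertion order (alternative decomposition, same cost on these inputs);
-- equivalence is claimed on topologically ordered parent maps with distinct keys (Pre_).

-- ===== PORT A =====
-- fuel only makes the recursion structural; under Pre_ the fuel visited.length + 2 is never exhausted
def dfsA (beginWord : String) (visited : List (String × List String)) : Nat → String → List (List String)
  | 0, _ => []
  | fuel+1, word =>
    if word = beginWord then [[beginWord]]
    else
      match (PySem.Dict.mk visited).get? word with
      | none => []
      | some parents =>
        ((parents.foldl (fun acc p => acc ++ dfsA beginWord visited fuel p) []).map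
          (fun r => r ++ [word]))

def get_ladders (beginWord : String) (endWord : String) (visited : List (String × List String)) : List (List String) :=
  dfsA beginWord visited (visited.length + 2) endWord

-- ===== PORT B =====
def lookupB (beginWord : String) (table : PySem.Dict String (List (List String))) (w : String) : List (List String) :=
  if w = beginWord then [[beginWord]] else table.getD w []

def get_ladders_alt (beginWord : String) (endWord : String) (visited : List (String × List String)) : List (List String) :=
  let table := visited.foldl
    (fun t kv => t.insert kv.1 (kv.2.flatMap (fun p => (lookupB beginWord t p).map (fun r => r ++ [kv.1]))))
    PySem.Dict.empty
  lookupB beginWord table endWord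

-- ===== PRECONDITION & SPEC =====
-- Pre_ excludes association lists with duplicate keys (a Python dict cannot have them, and the
-- list order makes the corner accidental) and parent maps that are not topologically ordered
-- (every parent must be beginWord, a non-key, or an earlier key): on cyclic maps A raises
-- RecursionError, and on acyclic but unordered maps — a shape Word Ladder's BFS never produces —
-- A still returns, so Pre_ is slightly narrower than A's termination domain (see cites).
def Pre_get_ladders (beginWord : String) (endWord : String) (visited : List (String × List String)) : Prop :=
  (visited.map Prod.fst).Nodup ∧
  ∀ j, (hj : j < visited.length) → ∀ p ∈ visited[j].2,
    p = beginWord ∨ p ∈ (visited.take j).map Prod.fst ∨ p ∉ visited.map Prod.fst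

instance (beginWord : String) (endWord : String) (visited : List (String × List String)) : Decidable (Pre_get_ladders beginWord endWord visited) := by unfold Pre_get_ladders; infer_instance

def pvWitness_get_ladders : String × String × (List (String × List String)) :=
  ("hit", "cog", [("hot", ["hit"]), ("dot", ["hot"]), ("lot", ["hot"]), ("dog", ["dot"]), ("log", ["lot"]), ("cog", ["dog", "log"])])

def Spec_get_ladders (beginWord : String) (endWord : String) (visited : List (String × List String)) (out : List (List String)) : Prop := out = get_ladders_alt beginWord endWord visited
instance (beginWord : String) (endWord : String) (visited : List (String × List String)) (out : List (List String)) : Decidable (Spec_get_ladders beginWord endWord visited out) := by unfold Spec_get_ladders; infer_instance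

-- ===== CLAIM (what is proved, stated in full; the proofs are below) =====
def Claim_equal_get_ladders : Prop := ∀ (beginWord : String) (endWord : String) (visited : List (String × List String)), Dom_get_ladders beginWord endWord visited → Pre_get_ladders beginWord endWord visited → Spec_get_ladders beginWord endWord visited (get_ladders beginWord endWord visited)

-- ===== LEMMAS AND PROOFS =====

-- the table after processing the first n entries of visited
def tbl (beginWord : String) (visited : List (String × List String)) (n : Nat) : PySem.Dict String (List (List String)) :=
  (visited.take n).foldl
    (fun t kv => t.insert kv.1 (kv.2.flatMap (fun p => (lookupB beginWord t p).map (fun r => r ++ [kv.1]))))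
    PySem.Dict.empty

-- words whose ladders are determined after n steps
def Ready (beginWord : String) (visited : List (String × List String)) (n : Nat) (w : String) : Prop :=
  w = beginWord ∨ w ∉ visited.map Prod.fst ∨ w ∈ (visited.take n).map Prod.fst

lemma mem_take_map_iff (v : List (String × List String)) (n : Nat) (w : String) :
    w ∈ (v.take n).map Prod.fst ↔ ∃ i, ∃ h : i < v.length, i < n ∧ v[i].1 = w := by
  rw [List.map_take, List.mem_take_iff_getElem]
  constructor
  · rintro ⟨i, hi, hgi⟩
    have hlen : i < v.length := by simp at hi; omega
    exact ⟨i, hlen, by simp at hi; omega, by simpa using hgi⟩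
  · rintro ⟨i, hlen, hin, hgi⟩
    exact ⟨i, by simp; omega, by simpa using hgi⟩

lemma get?_mk_eq_none (v : List (String × List String)) (w : String)
    (hw : w ∉ v.map Prod.fst) : (PySem.Dict.mk v).get? w = none := by
  rw [PySem.Dict.get?_eq_none_iff_not_mem_keys]
  simpa [PySem.Dict.keys_mk] using hw

lemma keys_tbl (b : String) (v : List (String × List String)) (n : Nat) (w : String)
    (hw : w ∈ (tbl b v n).keys) : w ∈ (v.take n).map Prod.fst := by
  unfold tbl at hw
  rw [PySem.Dict.keys_foldl_insert_key] at hw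
  have := (PySem.Set.mem_update PySem.Dict.empty.keys ((v.take n).map Prod.fst) w).1 hw
  simpa [PySem.Dict.keys_empty] using this

lemma invariant (b : String) (v : List (String × List String))
    (hnd : (v.map Prod.fst).Nodup)
    (hord : ∀ j, (hj : j < v.length) → ∀ p ∈ v[j].2,
      p = b ∨ p ∈ (v.take j).map Prod.fst ∨ p ∉ v.map Prod.fst) :
    ∀ n, n ≤ v.length → ∀ f w, Ready b v n w → n + 1 ≤ f →
      dfsA b v f w = lookupB b (tbl b v n) w := by
  intro n
  induction n with
  | zero =>
    intro _ f w hw hf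
    obtain ⟨f, rfl⟩ : ∃ f', f = f' + 1 := ⟨f - 1, by omega⟩
    by_cases hwb : w = b
    · subst hwb; simp [dfsA, lookupB]
    · have hwk : w ∉ v.map Prod.fst := by
        rcases hw with h | h | h
        · exact absurd h hwb
        · exact h
        · simp at h
      rw [lookupB, if_neg hwb]
      simp only [dfsA, if_neg hwb, get?_mk_eq_none v w hwk]
      rw [PySem.Dict.getD_of_not_contains]
      rw [PySem.Dict.contains_eq_decide_mem_keys]
      simp only [decide_eq_false_iff_not]
      intro hmem
      exact hwk (by simpa using keys_tbl b v 0 w hmem)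
  | succ n ih =>
    intro hn1 f w hw hf
    have hn : n < v.length := by omega
    have htake : v.take (n + 1) = v.take n ++ [v[n]] := by
      rw [List.take_add_one, List.getElem?_eq_getElem hn]; rfl
    have htbl : tbl b v (n + 1) = (tbl b v n).insert v[n].1
        (v[n].2.flatMap (fun p => (lookupB b (tbl b v n) p).map (fun r => r ++ [v[n].1]))) := by
      unfold tbl
      rw [htake, List.foldl_append]
      rfl
    obtain ⟨f, rfl⟩ : ∃ f', f = f' + 1 := ⟨f - 1, by omega⟩
    by_cases hwb : w = b
    · subst hwb; simp [dfsA, lookupB]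
    by_cases hwk : w ∈ v.map Prod.fst
    swap
    · rw [lookupB, if_neg hwb]
      simp only [dfsA, if_neg hwb, get?_mk_eq_none v w hwk]
      rw [PySem.Dict.getD_of_not_contains]
      rw [PySem.Dict.contains_eq_decide_mem_keys]
      simp only [decide_eq_false_iff_not]
      intro hmem
      have h1 := keys_tbl b v (n + 1) w hmem
      rw [List.map_take] at h1
      exact hwk (List.mem_of_mem_take h1)
    · have hwmem : w ∈ (v.take (n + 1)).map Prod.fst := by
        rcases hw with h | h | h
        · exact absurd h hwb
        · exact absurd hwk h
        · exact h
      rcases (mem_take_map_iff v (n + 1) w).1 hwmem with ⟨i, hiv, hin1, hieq⟩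
      by_cases hwkn : w = v[n].1
      · -- w is the key processed at step n
        have hget : (PySem.Dict.mk v).get? w = some v[n].2 := by
          apply PySem.Dict.get?_of_mem_items
          · show (w, v[n].2) ∈ v
            rw [hwkn]
            exact List.getElem_mem hn
          · simpa [PySem.Dict.keys_mk] using hnd
        simp only [dfsA, if_neg hwb, hget]
        rw [← List.flatMap_eq_foldl]
        have hcong : v[n].2.flatMap (fun p => dfsA b v f p)
            = v[n].2.flatMap (fun p => lookupB b (tbl b v n) p) := by
          apply List.flatMap_congr
          intro p hp
          have hready : Ready b v n p := by
            rcases hord n hn p hp with h | h | h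
            · exact Or.inl h
            · exact Or.inr (Or.inr h)
            · exact Or.inr (Or.inl h)
          exact ih (by omega) f p hready (by omega)
        rw [hcong, List.map_flatMap]
        rw [lookupB, if_neg hwb, htbl, hwkn, PySem.Dict.getD_insert_self]
      · -- w is an earlier key
        have hin : i < n := by
          rcases Nat.lt_succ_iff_lt_or_eq.1 hin1 with h | h
          · exact h
          · subst h; exact absurd hieq.symm hwkn
        have hready : Ready b v n w :=
          Or.inr (Or.inr ((mem_take_map_iff v n w).2 ⟨i, hiv, hin, hieq⟩))
        rw [ih (by omega) (f + 1) w hready (by omega)]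
        rw [lookupB, lookupB, if_neg hwb, if_neg hwb, htbl,
          PySem.Dict.getD_insert_of_ne _ _ _ hwkn]

-- ===== VERDICT (by name: the statement is the Claim_ definition above) =====
theorem get_ladders_spec : Claim_equal_get_ladders := by
  intro b e v _ hpre
  unfold Spec_get_ladders get_ladders get_ladders_alt
  have hready : Ready b v v.length e := by
    by_cases he : e ∈ v.map Prod.fst
    · right; right; simpa using he
    · right; left; exact he
  have := invariant b v hpre.1 hpre.2 v.length le_rfl (v.length + 2) e hready (by omega)
  simpa [tbl] using this
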